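-- pv_equiv track=rewrite | github.com/cedarconnor/comfyui-LatLong | nodes.py | _tokenize_face_order
-- ===== SOURCE A (Python) =====
-- from typing import Any, Dict, List, Optional, Tuple
--
-- def _tokenize_face_order(face_order: str) -> List[str]:
--     normalized = face_order.replace("|", ",").replace(";", ",")
--     tokens: List[str] = []
--     for part in normalized.split(","):
--         for token in part.strip().split():
--             if token:
--                 tokens.append(token)
--     return tokens
-- ===== SOURCE B (Python) =====
-- def _tokenize_face_order(face_order: str):
--     tokens = []
--     cur = []
--     for ch in face_order:
--         if ch in ",|;" or ch.isspace():
--             if cur: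
--                 tokens.append("".join(cur))
--                 cur = []
--         else:
--             cur.append(ch)
--     if cur:
--         tokens.append("".join(cur))
--     return tokens
-- ===== Notes on version B (the rewrite author's own statement) =====
-- stated objective: simpler
-- what changed: Replaces the replace-normalize / comma-split / per-part strip-and-whitespace-split pipeline with one linear character scan that flushes the current token at any separator (comma, pipe, semicolon or whitespace).
import Mathlib
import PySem

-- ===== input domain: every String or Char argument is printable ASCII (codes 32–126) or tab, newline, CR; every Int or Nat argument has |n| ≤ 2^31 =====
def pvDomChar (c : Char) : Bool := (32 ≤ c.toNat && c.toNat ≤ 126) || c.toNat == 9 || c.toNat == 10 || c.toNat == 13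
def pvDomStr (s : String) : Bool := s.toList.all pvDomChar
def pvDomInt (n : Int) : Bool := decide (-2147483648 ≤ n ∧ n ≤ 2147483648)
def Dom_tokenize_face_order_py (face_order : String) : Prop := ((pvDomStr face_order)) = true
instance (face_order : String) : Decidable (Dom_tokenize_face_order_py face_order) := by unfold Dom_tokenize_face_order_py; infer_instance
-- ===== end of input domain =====

-- B replaces A's replace-normalize / comma-split / per-part strip-and-whitespace-split pipeline
-- with one linear character scan that flushes the current token at any separator (simpler, one pass).

-- ===== PORT A =====
def tokenize_face_order_py (face_order : String) : List String :=
  let normalized := PySem.Str.replace (PySem.Str.replace face_order "|" ",") ";" ","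
  -- normalized.split(","): sep "," ≠ "", so Str.split? is `some`; `.getD []` is unreachable
  ((PySem.Str.split? normalized ",").getD []).foldl
    (fun tokens part =>
      (PySem.Str.split₀ (PySem.Str.strip part)).foldl
        (fun tokens token => if token ≠ "" then tokens ++ [token] else tokens)
        tokens)
    []

-- ===== PORT B =====
-- `ch in ",|;" or ch.isspace()`
def pvIsDelim (c : Char) : Bool := c == ',' || c == '|' || c == ';' || PySem.Chars.isspace c

-- the scan loop of Source B: `cur` is the current token's characters, `toks` the finished tokens
def tokenizeAltGo : List Char → List Char → List String → List String
  | [], cur, toks => if cur.isEmpty then toks else toks ++ [String.ofList cur]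
  | c :: rest, cur, toks =>
    if pvIsDelim c then
      if cur.isEmpty then tokenizeAltGo rest [] toks
      else tokenizeAltGo rest [] (toks ++ [String.ofList cur])
    else tokenizeAltGo rest (cur ++ [c]) toks

def tokenize_face_order_py_alt (face_order : String) : List String :=
  tokenizeAltGo face_order.toList [] []

-- ===== PRECONDITION & SPEC =====
def Spec_tokenize_face_order_py (face_order : String) (out : List String) : Prop := out = tokenize_face_order_py_alt face_order
instance (face_order : String) (out : List String) : Decidable (Spec_tokenize_face_order_py face_order out) := by unfold Spec_tokenize_face_order_py; infer_instance

-- ===== CLAIM (what is proved, stated in full; the proofs are below) =====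
def Claim_equal_tokenize_face_order_py : Prop := ∀ (face_order : String), Dom_tokenize_face_order_py face_order → Spec_tokenize_face_order_py face_order (tokenize_face_order_py face_order)

-- ===== LEMMAS AND PROOFS =====

/-- Reference scanner: maximal runs of non-`q` characters, `cur` the pending run. -/
def pvScan (q : Char → Bool) : List Char → List Char → List (List Char)
  | cur, [] => if cur = [] then [] else [cur]
  | cur, c :: l =>
    if q c then (if cur = [] then pvScan q [] l else cur :: pvScan q [] l)
    else pvScan q (cur ++ [c]) l

-- B's loop computes the scanner's words
theorem altGo_eq (l : List Char) : ∀ cur toks,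
    tokenizeAltGo l cur toks = toks ++ (pvScan pvIsDelim cur l).map String.ofList := by
  induction l with
  | nil =>
    intro cur toks
    simp [tokenizeAltGo, pvScan, List.isEmpty_iff]
    split <;> simp
  | cons c l ih =>
    intro cur toks
    simp only [tokenizeAltGo, pvScan, List.isEmpty_iff]
    by_cases hd : pvIsDelim c = true <;> simp [hd]
    · by_cases hc : cur = [] <;> simp [hc, ih]
    · exact ih _ _

-- scanning a list with no delimiters
theorem pvScan_all_false {q : Char → Bool} (l : List Char) (h : ∀ c ∈ l, q c = false) :
    ∀ cur, pvScan q cur l = if cur ++ l = [] then [] else [cur ++ l] := by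
  induction l with
  | nil => intro cur; simp [pvScan]
  | cons c l ih =>
    intro cur
    have hc := h c (by simp)
    rw [pvScan, hc]
    simp only [Bool.false_eq_true, if_false]
    rw [ih (fun x hx => h x (by simp [hx]))]
    simp

-- scanning a list of only delimiters
theorem pvScan_all_true {q : Char → Bool} (l : List Char) (h : ∀ c ∈ l, q c = true) :
    ∀ cur, pvScan q cur l = if cur = [] then [] else [cur] := by
  induction l with
  | nil => intro cur; simp [pvScan]
  | cons c l ih =>
    intro cur
    rw [pvScan, h c (by simp)]
    simp only [if_true]
    by_cases hc : cur = [] <;>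
      simp [hc, ih (fun x hx => h x (by simp [hx]))]

-- a delimiter-free prefix is simply accumulated
theorem pvScan_append_word {q : Char → Bool} (w : List Char) (h : ∀ c ∈ w, q c = false) :
    ∀ cur l, pvScan q cur (w ++ l) = pvScan q (cur ++ w) l := by
  induction w with
  | nil => intro cur l; simp
  | cons c w ih =>
    intro cur l
    rw [List.cons_append, pvScan, h c (by simp)]
    simp only [Bool.false_eq_true, if_false]
    rw [ih (fun x hx => h x (by simp [hx]))]
    simp

-- trailing delimiters are ignored
theorem pvScan_append_delims {q : Char → Bool} (t : List Char) (ht : ∀ c ∈ t, q c = true) :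
    ∀ l cur, pvScan q cur (l ++ t) = pvScan q cur l := by
  intro l
  induction l with
  | nil =>
    intro cur
    rw [List.nil_append, pvScan, pvScan_all_true t ht]
  | cons c l ih =>
    intro cur
    rw [List.cons_append, pvScan, pvScan]
    by_cases hc : q c = true <;> simp [hc, ih]

-- leading delimiters are ignored
theorem pvScan_dropWhile {q : Char → Bool} (l : List Char) :
    pvScan q [] (List.dropWhile q l) = pvScan q [] l := by
  induction l with
  | nil => simp
  | cons c l ih =>
    by_cases hc : q c = true
    · rw [List.dropWhile_cons_of_pos hc, ih, pvScan, hc]; simp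
    · rw [List.dropWhile_cons_of_neg hc]

-- strip does not change the words
theorem pvScan_strip (w : List Char) :
    pvScan PySem.Chars.isspace [] (PySem.Chars.strip w) = pvScan PySem.Chars.isspace [] w := by
  unfold PySem.Chars.strip PySem.Chars.rstrip PySem.Chars.lstrip
  set x := List.dropWhile PySem.Chars.isspace w with hx
  have hdecomp : x = (List.dropWhile PySem.Chars.isspace x.reverse).reverse
      ++ (List.takeWhile PySem.Chars.isspace x.reverse).reverse := by
    calc x = x.reverse.reverse := by rw [List.reverse_reverse]
      _ = (List.takeWhile PySem.Chars.isspace x.reverse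
            ++ List.dropWhile PySem.Chars.isspace x.reverse).reverse := by
          rw [List.takeWhile_append_dropWhile]
      _ = _ := by rw [List.reverse_append]
  have h1 : pvScan PySem.Chars.isspace [] ((List.dropWhile PySem.Chars.isspace x.reverse).reverse)
      = pvScan PySem.Chars.isspace [] x := by
    conv_rhs => rw [hdecomp]
    rw [pvScan_append_delims]
    intro c hc
    exact List.mem_takeWhile_imp (List.mem_reverse.mp hc)
  rw [h1, hx, pvScan_dropWhile]

-- words are never empty
theorem pvScan_ne_nil {q : Char → Bool} (l : List Char) :
    ∀ cur, ∀ w ∈ pvScan q cur l, w ≠ [] := by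
  induction l with
  | nil =>
    intro cur w hw
    by_cases hc : cur = [] <;> simp [pvScan, hc] at hw
    simp [hw, hc]
  | cons c l ih =>
    intro cur w hw
    rw [pvScan] at hw
    by_cases hq : q c = true <;> simp only [hq] at hw
    · by_cases hc : cur = [] <;> simp only [hc] at hw
      · exact ih [] w (by simpa using hw)
      · rcases List.mem_cons.mp hw with h | h
        · simp [h, hc]
        · exact ih [] w h
    · simp only [Bool.false_eq_true, if_false] at hw
      exact ih _ w hw

-- ---- A-side characterizations ----

-- single-character replace is a map
theorem replace_go_single (o n : Char) (l : List Char) :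
    ∀ (fuel : Nat) (acc : List Char), l.length ≤ fuel →
      PySem.Chars.replace.go [o] [n] fuel l acc
        = acc.reverse ++ l.map (fun c => if c = o then n else c) := by
  induction l with
  | nil =>
    intro fuel acc _
    cases fuel <;> simp [PySem.Chars.replace.go]
  | cons c l ih =>
    intro fuel acc hf
    cases fuel with
    | zero => simp at hf
    | succ fuel =>
      rw [PySem.Chars.replace.go]
      by_cases hc : c = o
      · simp only [hc, List.isPrefixOf, BEq.rfl, Bool.true_and, if_true]
        rw [List.length_singleton, List.drop_one, List.tail_cons,
          ih fuel _ (by simpa using hf)]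
        simp
      · have : ([o].isPrefixOf (c :: l)) = false := by
          simp [List.isPrefixOf]
          exact fun h => absurd h.symm hc
        rw [this]
        simp only [Bool.false_eq_true, if_false]
        rw [ih fuel _ (by simpa using hf)]
        simp [hc]

theorem replace_single (o n : Char) (l : List Char) :
    PySem.Chars.replace l [o] [n] = l.map (fun c => if c = o then n else c) := by
  rw [PySem.Chars.replace]
  simp only [List.isEmpty_cons, Bool.false_eq_true, if_false]
  rw [replace_go_single o n l l.length [] le_rfl]
  simp

-- single-character split is List.splitOnP
theorem splitOn_go_single (s : Char) (l : List Char) :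
    ∀ (fuel : Nat) (cur : List Char) (accs : List (List Char)), l.length < fuel →
      PySem.Chars.splitOn.go [s] fuel l cur accs
        = accs.reverse ++ (List.splitOnP (· == s) l).modifyHead (cur.reverse ++ ·) := by
  induction l with
  | nil =>
    intro fuel cur accs hf
    cases fuel with
    | zero => simp at hf
    | succ fuel => simp [PySem.Chars.splitOn.go, List.splitOnP_nil]
  | cons c l ih =>
    intro fuel cur accs hf
    cases fuel with
    | zero => simp at hf
    | succ fuel =>
      rw [PySem.Chars.splitOn.go]
      by_cases hc : c = s
      · have hpre : ([s].isPrefixOf (c :: l)) = true := by simp [List.isPrefixOf, hc]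
        rw [hpre]
        simp only [if_true, List.length_singleton, List.drop_one, List.tail_cons]
        rw [ih fuel [] _ (by simpa using Nat.lt_of_succ_lt_succ hf)]
        rw [List.splitOnP_cons]
        simp only [hc, BEq.rfl, if_true, List.reverse_cons, List.reverse_nil,
          List.nil_append, List.modifyHead_cons]
        obtain ⟨h, t, he⟩ := List.exists_cons_of_ne_nil
          (List.splitOnP_ne_nil (fun x => x == s) l)
        rw [he]
        simp
      · have hpre : ([s].isPrefixOf (c :: l)) = false := by
          simp [List.isPrefixOf]
          exact fun h => absurd h.symm hc
        rw [hpre]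
        simp only [Bool.false_eq_true, if_false]
        rw [ih fuel (c :: cur) _ (by simpa using Nat.lt_of_succ_lt_succ hf)]
        rw [List.splitOnP_cons]
        obtain ⟨h, t, he⟩ := List.exists_cons_of_ne_nil (List.splitOnP_ne_nil (· == s) l)
        simp [he, hc]

theorem splitOn_single (s : Char) (l : List Char) :
    PySem.Chars.splitOn l [s] = List.splitOnP (· == s) l := by
  rw [PySem.Chars.splitOn, splitOn_go_single s l (l.length + 1) [] [] (by omega)]
  obtain ⟨h, t, he⟩ := List.exists_cons_of_ne_nil (List.splitOnP_ne_nil (· == s) l)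
  simp [he]

-- split₀.go computes the scanner
theorem split₀_go_eq (l : List Char) :
    ∀ (cur : List Char) (acc : List (List Char)),
      PySem.Chars.split₀.go l cur acc
        = acc.reverse ++ pvScan PySem.Chars.isspace cur.reverse l := by
  induction l with
  | nil =>
    intro cur acc
    rw [PySem.Chars.split₀.go, pvScan]
    by_cases hc : cur = [] <;> simp [hc, List.isEmpty_iff]
  | cons c l ih =>
    intro cur acc
    rw [PySem.Chars.split₀.go, pvScan]
    by_cases hq : PySem.Chars.isspace c = true <;> simp only [hq, if_true,
      Bool.false_eq_true, if_false]
    · by_cases hc : cur = [] <;>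
        simp [hc, List.isEmpty_iff, ih]
    · rw [ih]
      simp

theorem split₀_eq (l : List Char) :
    PySem.Chars.split₀ l = pvScan PySem.Chars.isspace [] l := by
  rw [PySem.Chars.split₀, split₀_go_eq]
  simp

-- the central gluing lemma: comma-splitting then whitespace-splitting each part
-- is one scan over the union of the delimiters
theorem pvScan_flat (r q : Char → Bool) (cs : List Char) :
    ∀ (cur : List Char), (∀ c ∈ cur, (r c || q c) = false) →
      ∀ h t, List.splitOnP r cs = h :: t →
        pvScan q [] (cur ++ h) ++ t.flatMap (fun w => pvScan q [] w)
          = pvScan (fun c => r c || q c) cur cs := by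
  induction cs with
  | nil =>
    intro cur hcur h t he
    rw [List.splitOnP_nil] at he
    injection he with h1 h2
    subst h1; subst h2
    have hq : ∀ c ∈ cur, q c = false := fun c hc =>
      (Bool.or_eq_false_iff.mp (hcur c hc)).2
    simp only [List.append_nil, List.flatMap_nil]
    rw [pvScan_all_false cur hq []]
    simp [pvScan]
  | cons c cs ih =>
    intro cur hcur h t he
    obtain ⟨h', t', he'⟩ := List.exists_cons_of_ne_nil (List.splitOnP_ne_nil r cs)
    rw [List.splitOnP_cons, he'] at he
    have hstep := ih [] (by simp) h' t' he'
    rw [List.nil_append] at hstep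
    have hcurq : ∀ x ∈ cur, q x = false := fun x hx =>
      (Bool.or_eq_false_iff.mp (hcur x hx)).2
    by_cases hr : r c = true
    · simp only [hr, if_true] at he
      injection he with h1 h2
      subst h1; subst h2
      rw [List.append_nil, List.flatMap_cons, hstep,
        pvScan_all_false cur hcurq []]
      simp only [pvScan, hr, Bool.true_or, if_true]
      by_cases hc : cur = [] <;> simp [hc]
    · simp only [hr, Bool.false_eq_true, if_false, List.modifyHead_cons] at he
      injection he with h1 h2
      subst h1; subst h2
      by_cases hq : q c = true
      · rw [pvScan_append_word cur hcurq [] (c :: h'), List.nil_append]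
        simp only [pvScan, hq, hr, Bool.false_or, if_true]
        by_cases hc : cur = [] <;> simp [hc, ← hstep]
      · have hu : (r c || q c) = false := by simp [hr, hq]
        have hrec := ih (cur ++ [c])
          (by
            intro x hx
            rcases List.mem_append.mp hx with hx | hx
            · exact hcur x hx
            · simp at hx; subst hx; exact hu)
          h' t' he'
        have h2 : (cur ++ [c]) ++ h' = cur ++ c :: h' := by simp
        rw [h2] at hrec
        simp only [pvScan, hu, Bool.false_eq_true, if_false]
        exact hrec

-- the inner Python loop appends every (nonempty) token
theorem foldl_append_tokens (l : List String) (h : ∀ x ∈ l, x ≠ "") :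
    ∀ acc : List String,
      l.foldl (fun tokens token => if token ≠ "" then tokens ++ [token] else tokens) acc
        = acc ++ l := by
  induction l with
  | nil => simp
  | cons x l ih =>
    intro acc
    rw [List.foldl_cons, if_pos (h x (by simp))]
    rw [ih (fun y hy => h y (by simp [hy]))]
    simp

-- tokens produced by split₀ are nonempty strings
theorem split₀_tokens_ne (p : String) : ∀ x ∈ PySem.Str.split₀ (PySem.Str.strip p), x ≠ "" := by
  intro x hx
  have hlist : x.toList ∈ PySem.Chars.split₀ (PySem.Str.strip p).toList := by
    rw [← PySem.Str.split₀_map_toList]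
    exact List.mem_map_of_mem hx
  rw [split₀_eq] at hlist
  have hne : x.toList ≠ [] :=
    pvScan_ne_nil _ [] x.toList hlist
  intro hcontr
  exact hne (by simp [hcontr])

-- A's double fold, flattened
theorem outer_fold_eq (parts : List String) :
    ∀ acc : List String,
      parts.foldl
        (fun tokens part =>
          (PySem.Str.split₀ (PySem.Str.strip part)).foldl
            (fun tokens token => if token ≠ "" then tokens ++ [token] else tokens) tokens)
        acc
      = acc ++ parts.flatMap (fun part => PySem.Str.split₀ (PySem.Str.strip part)) := by
  induction parts with
  | nil => simp
  | cons p parts ih =>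
    intro acc
    rw [List.foldl_cons, foldl_append_tokens _ (split₀_tokens_ne p), ih]
    simp

-- Str.split? over a nonempty literal separator, as a map of the Chars version
theorem split?_comma (s : String) :
    (PySem.Str.split? s ",").getD []
      = (PySem.Chars.splitOn s.toList [',']).map String.ofList := by
  have hb := PySem.Str.split?_map s ","
  rw [PySem.Chars.split?] at hb
  simp only [show (",".toList) = [','] from rfl, List.isEmpty_cons, Bool.false_eq_true,
    if_false] at hb
  cases hs : PySem.Str.split? s "," with
  | none => rw [hs] at hb; simp at hb
  | some ps =>
    rw [hs] at hb
    simp only [Option.map_some, Option.some.injEq] at hb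
    rw [Option.getD_some, ← hb, List.map_map]
    have : (String.ofList ∘ String.toList) = id := by
      funext x; simp
    rw [this, List.map_id]

-- per-part tokenization, moved to character lists
theorem part_tokens (p : String) :
    PySem.Str.split₀ (PySem.Str.strip p)
      = (pvScan PySem.Chars.isspace [] p.toList).map String.ofList := by
  have h := PySem.Str.split₀_map_toList (PySem.Str.strip p)
  rw [split₀_eq, PySem.Str.toList_strip, pvScan_strip] at h
  rw [← h, List.map_map]
  have : (String.ofList ∘ String.toList) = id := by funext x; simp
  rw [this, List.map_id]

-- normalization map of A, fused
def pvNorm (c : Char) : Char := if c = ';' then ',' else if c = '|' then ',' else c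

-- the union delimiter seen through pvNorm is exactly B's delimiter test
theorem delim_norm (c : Char) :
    ((pvNorm c == ',') || PySem.Chars.isspace (pvNorm c)) = pvIsDelim c := by
  by_cases h1 : c = ';'
  · subst h1; rfl
  · by_cases h2 : c = '|'
    · subst h2; rfl
    · simp only [pvNorm, if_neg h1, if_neg h2, pvIsDelim]
      by_cases h3 : c = ','
      · subst h3; rfl
      · have b1 : (c == ',') = false := by simp [h3]
        have b2 : (c == '|') = false := by simp [h2]
        have b3 : (c == ';') = false := by simp [h1]
        rw [b1, b2, b3]
        simp

-- a scan over the normalized characters is a scan over the originals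
theorem pvScan_map_norm (l : List Char) :
    ∀ cur, pvScan (fun c => (c == ',') || PySem.Chars.isspace c) cur (l.map pvNorm)
      = pvScan pvIsDelim cur l := by
  induction l with
  | nil => intro cur; simp [pvScan]
  | cons c l ih =>
    intro cur
    rw [List.map_cons, pvScan, pvScan, delim_norm]
    by_cases hd : pvIsDelim c = true
    · simp only [hd, if_true]
      by_cases hc : cur = [] <;> simp [hc, ih]
    · simp only [hd, Bool.false_eq_true, if_false]
      have hcc : pvNorm c = c := by
        simp only [pvIsDelim, Bool.or_eq_true, beq_iff_eq] at hd
        simp only [not_or] at hd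
        simp [pvNorm, hd.1.1.2, hd.1.2]
      rw [hcc, ih]

-- main equation on strings
theorem tokenize_eq (s : String) :
    tokenize_face_order_py s = tokenize_face_order_py_alt s := by
  rw [tokenize_face_order_py, tokenize_face_order_py_alt, altGo_eq, List.nil_append]
  have hnorm :
      (PySem.Str.replace (PySem.Str.replace s "|" ",") ";" ",").toList
        = s.toList.map pvNorm := by
    rw [PySem.Str.toList_replace, PySem.Str.toList_replace]
    simp only [show (",".toList) = [','] from rfl, show (";".toList) = [';'] from rfl,
      show ("|".toList) = ['|'] from rfl]
    rw [replace_single, replace_single, List.map_map]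
    refine List.map_congr_left fun c _ => ?_
    by_cases h1 : c = '|' <;> by_cases h2 : c = ';' <;>
      simp [pvNorm, h1, h2, Function.comp]
  rw [outer_fold_eq, List.nil_append, split?_comma, hnorm, splitOn_single,
    List.flatMap_map]
  simp only [part_tokens, String.toList_ofList]
  rw [← List.map_flatMap]
  refine congrArg (List.map String.ofList) ?_
  obtain ⟨h, t, he⟩ := List.exists_cons_of_ne_nil
    (List.splitOnP_ne_nil (· == ',') (s.toList.map pvNorm))
  have := pvScan_flat (· == ',') PySem.Chars.isspace (s.toList.map pvNorm) []
    (by simp) h t he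
  rw [List.nil_append] at this
  rw [he, List.flatMap_cons, this, pvScan_map_norm]

-- ===== VERDICT (by name: the statement is the Claim_ definition above) =====
theorem tokenize_face_order_py_spec : Claim_equal_tokenize_face_order_py := by
  intro s _
  unfold Spec_tokenize_face_order_py
  exact tokenize_eq s
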